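-- pv_equiv track=rewrite | github.com/elizabethpaperno/AnnualCS | Netlogo/hw_stringExercises.py | FirstLastSequence
-- ===== SOURCE A (Python) =====
-- def FirstLast (name):
--     commaPos= name.find(",")
--     return name[commaPos + 2: len(name)] + name[commaPos+1] + name[:commaPos]
--
-- def FirstLastSequence (names):
--     newString = ""
--     prevSemi = -1
--     for i in range (len(names)):
--         if names[i].find(";") != -1:
--             newString += FirstLast(names[prevSemi+1:i]) + names[i]
--             prevSemi=i
--     return newString
-- ===== SOURCE B (Python) =====
-- def FirstLast(name):
--     commaPos = name.find(",")
--     return name[commaPos + 2: len(name)] + name[commaPos + 1] + name[:commaPos]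
--
--
-- def FirstLastSequence(names):
--     result = ""
--     for seg in names.split(";")[:-1]:
--         result += FirstLast(seg) + ";"
--     return result
-- ===== Notes on version B (the rewrite author's own statement) =====
-- stated objective: idiomatic
-- what changed: Replaces the per-character index scan with prevSemi bookkeeping by the idiomatic split-on-semicolon followed by one pass over the non-final tokens (FirstLast reused verbatim); the per-token C-level split removes the interpreted per-character loop.
import Mathlib
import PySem

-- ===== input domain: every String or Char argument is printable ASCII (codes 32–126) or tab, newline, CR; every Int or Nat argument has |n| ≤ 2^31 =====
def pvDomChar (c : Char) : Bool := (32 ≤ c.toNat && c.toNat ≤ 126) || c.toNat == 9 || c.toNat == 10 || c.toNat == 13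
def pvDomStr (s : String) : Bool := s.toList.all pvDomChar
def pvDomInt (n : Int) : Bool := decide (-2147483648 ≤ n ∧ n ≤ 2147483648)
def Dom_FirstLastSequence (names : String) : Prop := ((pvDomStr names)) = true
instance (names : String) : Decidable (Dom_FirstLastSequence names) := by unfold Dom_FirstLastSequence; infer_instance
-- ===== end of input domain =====

-- B replaces A's character-index scan (with prevSemi bookkeeping) by split-on-';' then a fold
-- over the non-final tokens (objective: idiomatic); the helper FirstLast is reused verbatim.


-- ===== PORT A =====
-- helper FirstLast (shared: Source B reuses it verbatim).  name[commaPos+1] raises IndexError in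
-- Python when out of range; the `none` branch returns [] — those inputs are outside Pre_.
def pvFirstLast (name : List Char) : List Char :=
  let commaPos := PySem.Chars.find name [',']
  match PySem.List.pyGet? name (commaPos + 1) with
  | none => []
  | some c =>
      PySem.List.slice name (some (commaPos + 2)) (some (name.length : Int))
        ++ [c] ++ PySem.List.slice name none (some commaPos)

-- one iteration of A's for-loop: state = (newString, prevSemi)
def pvStepA (cs : List Char) (st : List Char × Int) (i : Int) : List Char × Int :=
  match PySem.List.pyGet? cs i with
  | none => st
  | some c =>
      if PySem.Chars.find [c] [';'] ≠ -1 then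
        (st.1 ++ (pvFirstLast (PySem.List.slice cs (some (st.2 + 1)) (some i)) ++ [c]), i)
      else st

def FirstLastSequence (names : String) : String :=
  String.ofList
    (((PySem.List.pyRange 0 (names.toList.length : Int) 1).foldl
        (pvStepA names.toList) ([], -1)).1)

-- ===== PORT B =====
def FirstLastSequence_alt (names : String) : String :=
  String.ofList
    ((PySem.List.slice (PySem.Chars.splitOn names.toList [';']) none (some (-1))).foldl
      (fun result seg => result ++ (pvFirstLast seg ++ [';'])) [])

-- ===== PRECONDITION & SPEC =====
-- Pre_ excludes exactly the inputs where Python's A (and B alike) raise IndexError: some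
-- non-final semicolon-separated segment is empty or has its first comma as its last character.
-- (The Lean ports are total — pvFirstLast returns [] where Python raises — so the proof below
-- holds without using Pre_; Pre_ records where the Python programs actually return.)
def Pre_FirstLastSequence (names : String) : Prop :=
  ∀ seg ∈ (PySem.Chars.splitOn names.toList [';']).dropLast,
    PySem.Chars.find seg [','] + 1 < (seg.length : Int)
instance (names : String) : Decidable (Pre_FirstLastSequence names) := by
  unfold Pre_FirstLastSequence; infer_instance

def pvWitness_FirstLastSequence : String := "Doe, John; Smith, Jane;"

def Spec_FirstLastSequence (names : String) (out : String) : Prop := out = FirstLastSequence_alt names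
instance (names : String) (out : String) : Decidable (Spec_FirstLastSequence names out) := by unfold Spec_FirstLastSequence; infer_instance

-- ===== CLAIM (what is proved, stated in full; the proofs are below) =====
def Claim_equal_FirstLastSequence : Prop := ∀ (names : String), Dom_FirstLastSequence names → Pre_FirstLastSequence names → Spec_FirstLastSequence names (FirstLastSequence names)

-- ===== LEMMAS AND PROOFS =====

-- reference splitter: PySem.Chars.splitOn cs [';'] computes pvSplit [] cs (proved below)
def pvSplit (cur : List Char) : List Char → List (List Char)
  | [] => [cur]
  | c :: rest => if c = ';' then cur :: pvSplit [] rest else pvSplit (cur ++ [c]) rest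

theorem pvSplit_ne_nil (cur : List Char) (l : List Char) : pvSplit cur l ≠ [] := by
  induction l generalizing cur with
  | nil => simp [pvSplit]
  | cons c rest ih => simp only [pvSplit]; split_ifs <;> simp [ih]

theorem splitOn_go_spec : ∀ (l : List Char) (fuel : Nat) (cur : List Char)
    (acc : List (List Char)), l.length < fuel →
    PySem.Chars.splitOn.go [';'] fuel l cur acc = acc.reverse ++ pvSplit cur.reverse l := by
  intro l
  induction l with
  | nil =>
    intro fuel cur acc hf
    cases fuel with
    | zero => omega
    | succ f => simp [PySem.Chars.splitOn.go, pvSplit]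
  | cons c rest ih =>
    intro fuel cur acc hf
    cases fuel with
    | zero => omega
    | succ f =>
      simp only [PySem.Chars.splitOn.go]
      by_cases hc : c = ';'
      · subst hc
        simp only [List.isPrefixOf, BEq.rfl, Bool.true_and, if_true]
        rw [show (List.drop [';'].length (';' :: rest)) = rest by simp]
        rw [ih f [] (List.reverse cur :: acc) (by simp at hf; omega)]
        simp [pvSplit]
      · have hpf : ([';'].isPrefixOf (c :: rest)) = false := by
          simp [List.isPrefixOf]; exact fun h => absurd h.symm hc
        simp only [hpf, Bool.false_eq_true, if_false]
        rw [ih f (c :: cur) acc (by simp at hf ⊢; omega)]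
        simp [pvSplit, hc]

theorem splitOn_eq_pvSplit (cs : List Char) :
    PySem.Chars.splitOn cs [';'] = pvSplit [] cs := by
  unfold PySem.Chars.splitOn
  rw [splitOn_go_spec cs (cs.length + 1) [] [] (by omega)]
  simp

theorem pvSplit_no_semi (l : List Char) (cur : List Char) (h : ';' ∉ l) :
    pvSplit cur l = [cur ++ l] := by
  induction l generalizing cur with
  | nil => simp [pvSplit]
  | cons c rest ih =>
    simp only [List.mem_cons, not_or] at h
    rw [pvSplit, if_neg (fun hc => h.1 hc.symm), ih (cur ++ [c]) (by exact fun hm => h.2 hm)]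
    simp

theorem pvSplit_semi (pre : List Char) (rest cur : List Char) (h : ';' ∉ pre) :
    pvSplit cur (pre ++ ';' :: rest) = (cur ++ pre) :: pvSplit [] rest := by
  induction pre generalizing cur with
  | nil => simp [pvSplit]
  | cons c p ih =>
    simp only [List.mem_cons, not_or] at h
    rw [List.cons_append, pvSplit, if_neg (fun hc => h.1 hc.symm), ih (cur ++ [c]) h.2]
    simp

theorem first_occ {l : List Char} (h : ';' ∈ l) :
    ∃ pre rest, l = pre ++ ';' :: rest ∧ ';' ∉ pre := by
  induction l with
  | nil => cases h
  | cons c rest ih =>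
    by_cases hc : c = ';'
    · exact ⟨[], rest, by simp [hc], by simp⟩
    · have hm : ';' ∈ rest := by
        rcases List.mem_cons.mp h with h' | h'
        · exact absurd h'.symm hc
        · exact h'
      obtain ⟨p, r, hpr, hnp⟩ := ih hm
      refine ⟨c :: p, r, by simp [hpr], ?_⟩
      simp only [List.mem_cons, not_or]
      exact ⟨fun h' => hc h'.symm, hnp⟩

theorem foldl_id {α β : Type} (f : α → β → α) (l : List β) (st : α)
    (h : ∀ st' x, x ∈ l → f st' x = st') : l.foldl f st = st := by
  induction l generalizing st with
  | nil => rfl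
  | cons a l ih =>
    rw [List.foldl_cons, h st a (by simp)]
    exact ih st (fun st' x hx => h st' x (List.mem_cons_of_mem _ hx))

theorem find_singleton_semi (c : Char) :
    PySem.Chars.find [c] [';'] ≠ -1 ↔ c = ';' := by
  rw [PySem.Chars.find_ne_neg_one_iff]
  constructor
  · intro h
    exact (List.mem_singleton.mp (List.singleton_sublist.mp h.sublist)).symm
  · intro h; subst h; exact List.infix_refl _

theorem step_id (cs : List Char) (st : List Char × Int) (i : Int)
    (h0 : 0 ≤ i) (hlt : i < (cs.length : Int))
    (hne : cs[i.toNat]'(by omega) ≠ ';') : pvStepA cs st i = st := by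
  unfold pvStepA
  rw [PySem.List.pyGet?_eq_some_getElem cs h0 hlt]
  simp [find_singleton_semi, hne]

theorem main_loop (cs : List Char) (k : Nat) (acc : List Char) (hk : k ≤ cs.length) :
    ((PySem.List.pyRange (k : Int) (cs.length : Int) 1).foldl (pvStepA cs) (acc, (k : Int) - 1)).1
      = acc ++ (pvSplit [] (cs.drop k)).dropLast.flatMap (fun seg => pvFirstLast seg ++ [';']) := by
  by_cases hs : ';' ∈ cs.drop k
  · obtain ⟨pre, rest, hd, hnp⟩ := first_occ hs
    have hlen : cs.length - k = pre.length + 1 + rest.length := by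
      have h' := congrArg List.length hd; simp at h'; omega
    have hmn : k + pre.length < cs.length := by omega
    -- characters of cs at positions in [k, k+pre.length) lie in pre, hence are not ';'
    have hchar : ∀ (j : Nat), k ≤ j → (hj : j < k + pre.length) →
        cs[j]'(by omega) ≠ ';' := by
      intro j hj1 hj2
      have hb : j - k < pre.length := by omega
      have h1 : cs[j]'(by omega) = (cs.drop k)[j - k]'(by simp; omega) := by
        rw [List.getElem_drop]; congr 1; omega
      have h2 : (cs.drop k)[j - k]'(by simp; omega) = pre[j - k]'hb := by
        simp only [hd]; rw [List.getElem_append_left hb]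
      rw [h1, h2]
      intro hsem
      exact hnp (hsem ▸ List.getElem_mem hb)
    rw [PySem.List.pyRange_one_append (k : Int) ((k + pre.length : Nat) : Int) (cs.length : Int)
          (by push_cast; omega) (by push_cast; omega),
        PySem.List.pyRange_one_cons (a := ((k + pre.length : Nat) : Int)) (by push_cast; omega),
        List.foldl_append, List.foldl_cons]
    rw [show List.foldl (pvStepA cs) (acc, (k:Int) - 1)
          (PySem.List.pyRange (k:Int) ((k + pre.length : Nat) : Int) 1) = (acc, (k:Int) - 1)
        from foldl_id _ _ _ (fun st i hi => by
      rw [PySem.List.mem_pyRange_one] at hi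
      obtain ⟨hi1, hi2⟩ := hi
      have h0 : (0:Int) ≤ i := le_trans (by positivity) hi1
      obtain ⟨j, rfl⟩ : ∃ j : Nat, i = (j : Int) := ⟨i.toNat, (Int.toNat_of_nonneg h0).symm⟩
      refine step_id cs st (j : Int) h0 (by push_cast at hi2 ⊢; omega) ?_
      have hik : k ≤ j := by exact_mod_cast hi1
      have him : j < k + pre.length := by exact_mod_cast hi2
      simpa using hchar j hik him)]
    -- the step at index k + pre.length : the character is ';'
    have hm0 : (0:Int) ≤ ((k + pre.length : Nat) : Int) := by positivity
    have hsemi : cs[(((k + pre.length : Nat) : Int)).toNat]'(by simp; omega) = ';' := by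
      simp only [Int.toNat_natCast]
      have h1 : cs[k + pre.length]'(by omega) = (cs.drop k)[pre.length]'(by simp; omega) := by
        rw [List.getElem_drop]
      rw [h1]; simp only [hd]
      rw [List.getElem_append_right (by omega)]
      simp
    rw [show pvStepA cs (acc, (k:Int) - 1) ((k + pre.length : Nat) : Int)
          = (acc ++ (pvFirstLast pre ++ [';']), ((k + pre.length : Nat) : Int)) by
      unfold pvStepA
      rw [PySem.List.pyGet?_eq_some_getElem cs hm0 (by push_cast; omega)]
      rw [hsemi]
      have hsl : PySem.List.slice cs (some ((k : Nat) : Int))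
          (some (((k : Nat) : Int) + ((pre.length : Nat) : Int))) = pre := by
        rw [PySem.List.slice_natCast_add, hd, List.take_left]
      simp [find_singleton_semi, hsl]]
    rw [show ((k + pre.length : Nat) : Int) = ((k + pre.length + 1 : Nat) : Int) - 1 by push_cast; ring]
    rw [show ((k + pre.length + 1 : Nat) : Int) - 1 + 1 = ((k + pre.length + 1 : Nat) : Int)
        by ring]
    rw [main_loop cs (k + pre.length + 1) (acc ++ (pvFirstLast pre ++ [';'])) (by omega)]
    have hdrop : cs.drop (k + pre.length + 1) = rest := by
      have h1 : cs.drop (k + pre.length + 1) = (cs.drop k).drop (pre.length + 1) := by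
        rw [List.drop_drop]; congr 1
      rw [h1, hd, show pre ++ ';' :: rest = (pre ++ [';']) ++ rest by simp,
          show pre.length + 1 = (pre ++ [';']).length by simp, List.drop_left]
    rw [hdrop, hd, pvSplit_semi pre rest [] hnp]
    rw [List.dropLast_cons_of_ne_nil (pvSplit_ne_nil [] rest)]
    simp
  · rw [foldl_id _ _ _ (fun st i hi => by
      rw [PySem.List.mem_pyRange_one] at hi
      obtain ⟨hi1, hi2⟩ := hi
      have h0 : (0:Int) ≤ i := le_trans (by positivity) hi1
      obtain ⟨j, rfl⟩ : ∃ j : Nat, i = (j : Int) := ⟨i.toNat, (Int.toNat_of_nonneg h0).symm⟩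
      refine step_id cs st (j : Int) h0 hi2 ?_
      have hik : k ≤ j := by exact_mod_cast hi1
      have hjl : j < cs.length := by exact_mod_cast hi2
      intro hsem
      apply hs
      have h1 : cs[((j:Int)).toNat]'(by simpa using hjl) = (cs.drop k)[j - k]'(by
          simp; omega) := by
        simp only [Int.toNat_natCast]
        rw [List.getElem_drop]; congr 1; omega
      rw [h1] at hsem
      exact hsem ▸ List.getElem_mem _)]
    rw [pvSplit_no_semi _ _ hs]
    simp
termination_by cs.length - k

-- ===== VERDICT (by name: the statement is the Claim_ definition above) =====
theorem FirstLastSequence_spec : Claim_equal_FirstLastSequence := by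
  intro names _ _
  unfold Spec_FirstLastSequence FirstLastSequence FirstLastSequence_alt
  have h := main_loop names.toList 0 [] (Nat.zero_le _)
  simp only [Nat.cast_zero, zero_sub, List.drop_zero, List.nil_append] at h
  rw [h, PySem.List.slice_to_neg_one, splitOn_eq_pvSplit,
      PySem.List.foldl_append_eq_flatMap (fun seg => pvFirstLast seg ++ [';'])]
  simp
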